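-- pv_equiv track=rewrite | github.com/Newbility523/VisualDataTool | main.py | get_count_data
-- ===== SOURCE A (Python) =====
-- def get_count_data(size_list: list):
--     temp_dic = {}
--     for item in size_list:
--         if item not in temp_dic:
--             temp_dic[item] = 0
--         temp_dic[item] += 1
--
--     size_list.sort()
--     data = {
--         'size': [],
--         'count': []
--     }
--     for item in size_list:
--         data['size'].append(item)
--         data['count'].append(temp_dic[item])
--
--     return data, 'size', 'count'
-- ===== SOURCE B (Python) =====
-- def get_count_data(size_list: list):
--     size_list.sort()
--     sizes = []
--     counts = []
--     i = 0
--     n = len(size_list)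
--     while i < n:
--         j = i
--         while j < n and size_list[j] == size_list[i]:
--             j += 1
--         run_len = j - i
--         sizes.extend(size_list[i:j])
--         counts.extend([run_len] * run_len)
--         i = j
--     return {'size': sizes, 'count': counts}, 'size', 'count'
-- ===== Notes on version B (the rewrite author's own statement) =====
-- stated objective: alternative
-- what changed: Replaces the counting dict plus per-element lookup with a single run-grouping scan over the sorted list: each maximal run of equal values contributes its key run-length times and its length run-length times.
import Mathlib
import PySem

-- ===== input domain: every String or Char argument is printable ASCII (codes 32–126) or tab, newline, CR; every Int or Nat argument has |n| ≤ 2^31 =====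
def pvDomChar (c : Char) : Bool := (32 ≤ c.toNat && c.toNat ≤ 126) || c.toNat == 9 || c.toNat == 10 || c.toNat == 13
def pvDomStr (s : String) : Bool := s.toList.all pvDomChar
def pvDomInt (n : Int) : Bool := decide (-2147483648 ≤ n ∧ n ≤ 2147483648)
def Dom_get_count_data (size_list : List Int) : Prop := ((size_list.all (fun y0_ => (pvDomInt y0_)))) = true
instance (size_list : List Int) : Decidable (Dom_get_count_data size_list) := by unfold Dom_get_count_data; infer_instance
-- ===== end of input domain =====

-- B replaces A's counting dict with a run-grouping scan of the sorted list (alternative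
-- decomposition, same O(n log n) cost). Both A and B sort the argument in place; the
-- equivalence proved here is about the RETURN value.

-- ===== PORT A =====
-- A's `temp_dic[item]` lookup is ported as `getD … 0`; it is exact here because every
-- item of the sorted list is a key of the dict (it was inserted in the first loop).
def get_count_data (size_list : List Int) : (List (String × List Int)) × String × String :=
  let temp_dic : PySem.Dict Int Int :=
    size_list.foldl (fun d item =>
      let d1 := if d.contains item then d else d.insert item 0
      d1.insert item (d1.getD item 0 + 1)) PySem.Dict.empty
  let sorted_list := PySem.List.sorted size_list (fun x => x) false
  let p : List Int × List Int :=
    sorted_list.foldl (fun acc item => (acc.1 ++ [item], acc.2 ++ [temp_dic.getD item 0])) ([], [])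
  ([("size", p.1), ("count", p.2)], "size", "count")

-- ===== PORT B =====
-- B's while loop "advance j over the run equal to size_list[i], emit the run and its
-- length run-length times, continue at j" as structural recursion on the list.
def pvRuns (l : List Int) : List Int × List Int :=
  match l with
  | [] => ([], [])
  | x :: xs =>
    let run := xs.takeWhile (fun y => y == x)
    let rest := xs.dropWhile (fun y => y == x)
    let p := pvRuns rest
    (x :: run ++ p.1, List.replicate (run.length + 1) ((run.length : Int) + 1) ++ p.2)
termination_by l.length
decreasing_by
  simpa using Nat.lt_succ_of_le (List.length_dropWhile_le _ _)

def get_count_data_alt (size_list : List Int) : (List (String × List Int)) × String × String :=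
  let s := PySem.List.sorted size_list (fun x => x) false
  let p := pvRuns s
  ([("size", p.1), ("count", p.2)], "size", "count")

-- ===== PRECONDITION & SPEC =====
def Spec_get_count_data (size_list : List Int) (out : (List (String × List Int)) × String × String) : Prop := out = get_count_data_alt size_list
instance (size_list : List Int) (out : (List (String × List Int)) × String × String) : Decidable (Spec_get_count_data size_list out) := by unfold Spec_get_count_data; infer_instance

-- ===== CLAIM (what is proved, stated in full; the proofs are below) =====
def Claim_equal_get_count_data : Prop := ∀ (size_list : List Int), Dom_get_count_data size_list → Spec_get_count_data size_list (get_count_data size_list)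

-- ===== LEMMAS AND PROOFS =====

-- A's counting loop is a counter: the stored value of v is the number of occurrences of v.
theorem pv_counter_getD (l : List Int) (d : PySem.Dict Int Int) (v : Int) :
    (l.foldl (fun d item =>
      let d1 := if d.contains item then d else d.insert item 0
      d1.insert item (d1.getD item 0 + 1)) d).getD v 0 = d.getD v 0 + l.count v := by
  induction l generalizing d with
  | nil => simp
  | cons x xs ih =>
    have hd1 : ∀ w : Int, (if d.contains x then d else d.insert x 0).getD w 0 = d.getD w 0 := by
      intro w
      by_cases hc : d.contains x
      · simp [hc]
      · rw [if_neg (by simp [hc]), PySem.Dict.getD_insert]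
        by_cases hw : w = x
        · subst hw
          rw [if_pos rfl]
          exact (PySem.Dict.getD_of_not_contains d 0 (by simpa using hc)).symm
        · rw [if_neg hw]
    simp only [List.foldl_cons, ih, List.count_cons, PySem.Dict.getD_insert]
    by_cases hv : v = x
    · simp [hv, hd1]; omega
    · simp [hv, hd1, Ne.symm hv]

-- A's output loop just appends, so it is the list and its map.
theorem pv_fold_append (f : Int → Int) (l : List Int) (a b : List Int) :
    l.foldl (fun acc item => (acc.1 ++ [item], acc.2 ++ [f item])) (a, b)
      = (a ++ l, b ++ l.map f) := by
  induction l generalizing a b with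
  | nil => simp
  | cons x xs ih => simp [ih]

theorem pv_drop_gt (x : Int) (xs : List Int) (h : (x :: xs).Pairwise (· ≤ ·)) :
    ∀ y ∈ xs.dropWhile (fun y => y == x), x < y := by
  induction xs with
  | nil => simp
  | cons a as ih =>
    rcases List.pairwise_cons.1 h with ⟨hx, ha⟩
    by_cases hax : a = x
    · subst hax
      rw [List.dropWhile_cons_of_pos (by simp)]
      exact ih (List.pairwise_cons.2 ⟨fun y hy => le_trans (hx a (by simp))
        ((List.pairwise_cons.1 ha).1 y hy), (List.pairwise_cons.1 ha).2⟩)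
    · rw [List.dropWhile_cons_of_neg (by simpa using hax)]
      intro y hy
      rcases List.mem_cons.1 hy with rfl | hy
      · exact lt_of_le_of_ne (hx y (by simp)) (Ne.symm hax)
      · exact lt_of_lt_of_le (lt_of_le_of_ne (hx a (by simp)) (Ne.symm hax))
          ((List.pairwise_cons.1 ha).1 y hy)

-- Run grouping on a sorted list yields the list and its per-element occurrence counts.
theorem pv_runs_sorted_aux (n : Nat) : ∀ l : List Int, l.length ≤ n → l.Pairwise (· ≤ ·) →
    pvRuns l = (l, l.map (fun y => (l.count y : Int))) := by
  induction n with
  | zero =>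
    intro l hl _
    have : l = [] := by cases l with | nil => rfl | cons a as => simp at hl
    subst this; simp [pvRuns]
  | succ n ih =>
    intro l hl h
    cases l with
    | nil => simp [pvRuns]
    | cons x xs =>
      have hpxs := (List.pairwise_cons.1 h).2
      have hrun : ∀ y ∈ xs.takeWhile (fun y => y == x), y = x := by
        intro y hy; simpa using List.mem_takeWhile_imp hy
      have hdrop := pv_drop_gt x xs h
      have hxne : ∀ y ∈ xs.dropWhile (fun y => y == x), y ≠ x :=
        fun y hy => ne_of_gt (hdrop y hy)
      have hrest : (xs.dropWhile (fun y => y == x)).Pairwise (· ≤ ·) :=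
        hpxs.sublist (List.dropWhile_sublist _)
      have hlen : (xs.dropWhile (fun y => y == x)).length ≤ n :=
        le_trans (List.length_dropWhile_le _ _) (Nat.succ_le_succ_iff.1 hl)
      have ihr := ih _ hlen hrest
      rw [pvRuns]
      simp only [ihr, Prod.mk.injEq]
      have hsplit : x :: xs
          = (x :: xs.takeWhile (fun y => y == x)) ++ xs.dropWhile (fun y => y == x) := by
        simp [List.takeWhile_append_dropWhile]
      refine ⟨by simp [hsplit.symm], ?_⟩
      have hcx : (x :: xs).count x = (xs.takeWhile (fun y => y == x)).length + 1 := by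
        rw [hsplit, List.count_append]
        have h1 : (x :: xs.takeWhile (fun y => y == x)).count x
            = (xs.takeWhile (fun y => y == x)).length + 1 := by
          rw [List.count_cons_self]
          congr 1
          rw [List.count_eq_length]
          intro b hb; exact ((hrun b hb).symm ▸ rfl)
        have h2 : (xs.dropWhile (fun y => y == x)).count x = 0 :=
          List.count_eq_zero.2 (fun hmem => (hxne x hmem) rfl)
        omega
      have hcy : ∀ y ∈ xs.dropWhile (fun y => y == x),
          (x :: xs).count y = (xs.dropWhile (fun y => y == x)).count y := by
        intro y hy
        rw [hsplit, List.count_append]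
        have : (x :: xs.takeWhile (fun y => y == x)).count y = 0 := by
          rw [List.count_eq_zero]
          intro hmem
          rcases List.mem_cons.1 hmem with rfl | hmem
          · exact (hxne y hy) rfl
          · exact (hxne y hy) (hrun y hmem)
        omega
      calc List.replicate ((xs.takeWhile (fun y => y == x)).length + 1)
              (((xs.takeWhile (fun y => y == x)).length : Int) + 1)
            ++ (xs.dropWhile (fun y => y == x)).map
                (fun y => ((xs.dropWhile (fun y => y == x)).count y : Int))
          = (x :: xs.takeWhile (fun y => y == x)).map (fun y => (((x :: xs).count y : Int)))
            ++ (xs.dropWhile (fun y => y == x)).map (fun y => (((x :: xs).count y : Int))) := by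
            congr 1
            · symm
              rw [List.eq_replicate_iff]
              refine ⟨by simp, ?_⟩
              intro b hb
              rcases List.mem_map.1 hb with ⟨y, hy, rfl⟩
              have hyx : y = x := by
                rcases List.mem_cons.1 hy with rfl | hy
                · rfl
                · exact hrun y hy
              subst hyx
              rw [hcx]; push_cast; ring
            · apply List.map_congr_left
              intro y hy
              rw [hcy y hy]
          _ = (x :: xs).map (fun y => (((x :: xs).count y : Int))) := by
            rw [← List.map_append, ← hsplit]

theorem pv_runs_sorted (l : List Int) (h : l.Pairwise (· ≤ ·)) :
    pvRuns l = (l, l.map (fun y => (l.count y : Int))) :=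
  pv_runs_sorted_aux l.length l le_rfl h

-- ===== VERDICT (by name: the statement is the Claim_ definition above) =====
theorem get_count_data_spec : Claim_equal_get_count_data := by
  intro size_list _
  have hperm := PySem.List.sorted_perm size_list (fun x => x) false
  have hpw : (PySem.List.sorted size_list (fun x => x) false).Pairwise (· ≤ ·) := by
    simpa using PySem.List.sorted_pairwise size_list (fun x => x)
  unfold Spec_get_count_data get_count_data get_count_data_alt
  simp only [pv_fold_append, pv_runs_sorted _ hpw, List.nil_append]
  refine congrArg (fun z => (([("size", PySem.List.sorted size_list (fun x => x) false),
    ("count", z)] : List (String × List Int)), "size", "count")) ?_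
  apply List.map_congr_left
  intro y _
  rw [pv_counter_getD, PySem.Dict.getD_empty, hperm.count_eq]
  ring
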